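-- pv_equiv track=rewrite | github.com/teiknsmith/advent-of-code | 2020/24/sol.py | selected_tile
-- ===== SOURCE A (Python) =====
-- def selected_tile(path):
--     tile = [0,0]
--     prevc = None
--     for c in path:
--         if c == 'w' and prevc != 'n':
--             tile[0] -= 1
--         elif c == 'e' and prevc != 's':
--             tile[0] += 1
--         elif c == 'n':
--             tile[1] += 1
--         elif c == 's':
--             tile[1] -= 1
--         prevc = c
--     return tuple(tile)
-- ===== SOURCE B (Python) =====
-- def selected_tile(path):
--     # closed form: north/south always move y; east moves x unless preceded by south,
--     # west moves x unless preceded by north -- so substring counts suffice.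
--     x = path.count('e') - path.count('se') - path.count('w') + path.count('nw')
--     y = path.count('n') - path.count('s')
--     return (x, y)
-- ===== Notes on version B (the rewrite author's own statement) =====
-- stated objective: faster
-- what changed: Replaces the stateful previous-character loop by a closed form built from substring counts: y is the count of norths minus souths, x is easts minus southeasts minus wests plus northwests.
import Mathlib
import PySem

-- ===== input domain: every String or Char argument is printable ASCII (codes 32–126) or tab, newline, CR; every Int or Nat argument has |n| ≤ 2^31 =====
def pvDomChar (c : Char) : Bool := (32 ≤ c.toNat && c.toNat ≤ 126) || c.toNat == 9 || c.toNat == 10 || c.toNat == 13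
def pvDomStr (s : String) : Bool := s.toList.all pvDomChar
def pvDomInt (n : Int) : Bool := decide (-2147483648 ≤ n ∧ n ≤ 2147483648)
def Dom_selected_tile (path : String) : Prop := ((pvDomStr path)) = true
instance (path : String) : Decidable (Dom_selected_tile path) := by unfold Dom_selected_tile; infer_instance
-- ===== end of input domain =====

-- B replaces A's stateful previous-character loop by a closed form over substring counts (same O(n), measurably faster via C-level str.count).


-- ===== PORT A =====
-- one loop step of A: updates the tile according to c and the previous character
def pvStepA (st : (Int × Int) × Option Char) (c : Char) : (Int × Int) × Option Char :=
  let tile := st.1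
  let prevc := st.2
  let tile' :=
    if c = 'w' ∧ prevc ≠ some 'n' then (tile.1 - 1, tile.2)
    else if c = 'e' ∧ prevc ≠ some 's' then (tile.1 + 1, tile.2)
    else if c = 'n' then (tile.1, tile.2 + 1)
    else if c = 's' then (tile.1, tile.2 - 1)
    else tile
  (tile', some c)

def selected_tile (path : String) : Int × Int :=
  (path.toList.foldl pvStepA ((0, 0), none)).1

-- ===== PORT B =====
def selected_tile_alt (path : String) : Int × Int :=
  ((PySem.Str.count path "e" : Int) - (PySem.Str.count path "se" : Int)
     - (PySem.Str.count path "w" : Int) + (PySem.Str.count path "nw" : Int),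
   (PySem.Str.count path "n" : Int) - (PySem.Str.count path "s" : Int))

-- ===== PRECONDITION & SPEC =====
def Spec_selected_tile (path : String) (out : Int × Int) : Prop := out = selected_tile_alt path
instance (path : String) (out : Int × Int) : Decidable (Spec_selected_tile path out) := by unfold Spec_selected_tile; infer_instance

-- ===== CLAIM (what is proved, stated in full; the proofs are below) =====
def Claim_equal_selected_tile : Prop := ∀ (path : String), Dom_selected_tile path → Spec_selected_tile path (selected_tile path)

-- ===== LEMMAS AND PROOFS =====

-- number of adjacent pairs (a, b) inside l
def pvPairCnt (a b : Char) : List Char → Nat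
  | [] => 0
  | c :: t => (if c = a ∧ t.head? = some b then 1 else 0) + pvPairCnt a b t

-- the x-displacement A's loop accumulates over l, starting with previous char `prev`
def pvCntE (prev : Option Char) : List Char → Int
  | [] => 0
  | c :: t =>
      (if c = 'w' ∧ prev ≠ some 'n' then -1
       else if c = 'e' ∧ prev ≠ some 's' then 1 else 0) + pvCntE (some c) t

lemma pvGo_single (c : Char) : ∀ (fuel : Nat) (l : List Char) (acc : Nat),
    l.length ≤ fuel → PySem.Chars.count.go [c] fuel l acc = acc + l.count c := by
  intro fuel
  induction fuel with
  | zero =>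
      intro l acc h
      have : l = [] := List.length_eq_zero_iff.mp (Nat.le_zero.mp h)
      subst this; simp [PySem.Chars.count.go]
  | succ n ih =>
      intro l acc h
      cases l with
      | nil => simp [PySem.Chars.count.go]
      | cons x t =>
          have hlen : t.length ≤ n := by simp at h; omega
          by_cases hx : x = c
          · subst hx
            have hp : [x].isPrefixOf (x :: t) = true := by simp [List.isPrefixOf]
            simp only [PySem.Chars.count.go, hp, if_pos]
            rw [show List.drop [x].length (x :: t) = t from rfl, ih t (acc + 1) hlen]
            simp [List.count_cons]
            omega
          · have hp : [c].isPrefixOf (x :: t) = false := by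
              simp [List.isPrefixOf]
              exact fun hc => hx hc.symm
            simp only [PySem.Chars.count.go, hp, Bool.false_eq_true, if_false]
            have hxc : (x == c) = false := by simp [hx]
            rw [ih t acc hlen, List.count_cons, hxc]
            simp

lemma pvGo_pair (a b : Char) (hab : a ≠ b) : ∀ (fuel : Nat) (l : List Char) (acc : Nat),
    l.length ≤ fuel → PySem.Chars.count.go [a, b] fuel l acc = acc + pvPairCnt a b l := by
  intro fuel
  induction fuel with
  | zero =>
      intro l acc h
      have : l = [] := List.length_eq_zero_iff.mp (Nat.le_zero.mp h)
      subst this; simp [PySem.Chars.count.go, pvPairCnt]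
  | succ n ih =>
      intro l acc h
      cases l with
      | nil => simp [PySem.Chars.count.go, pvPairCnt]
      | cons x t =>
          by_cases hp : [a, b].isPrefixOf (x :: t) = true
          · obtain ⟨rfl, t', rfl⟩ : x = a ∧ ∃ t', t = b :: t' := by
              cases t with
              | nil => simp [List.isPrefixOf] at hp
              | cons y t' =>
                  simp [List.isPrefixOf] at hp
                  exact ⟨hp.1.symm, t', by rw [hp.2]⟩
            simp only [PySem.Chars.count.go, hp, if_pos]
            have hlen : t'.length ≤ n := by simp at h; omega
            rw [show List.drop [x, b].length (x :: b :: t') = t' from rfl, ih t' (acc + 1) hlen]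
            simp [pvPairCnt]
            rw [if_neg (fun hc => hab hc.1.symm)]
            omega
          · have hp' : [a, b].isPrefixOf (x :: t) = false := by
              cases hq : [a, b].isPrefixOf (x :: t) with
              | false => rfl
              | true => exact absurd hq hp
            simp only [PySem.Chars.count.go, hp', Bool.false_eq_true, if_false]
            rw [ih t acc (by simp at h; omega)]
            have hno : ¬(x = a ∧ t.head? = some b) := by
              rintro ⟨rfl, hh⟩
              cases t with
              | nil => simp at hh
              | cons y t'' =>
                  simp at hh
                  subst hh
                  simp [List.isPrefixOf] at hp
            simp [pvPairCnt, hno]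

lemma pvCount_single (l : List Char) (c : Char) :
    PySem.Chars.count l [c] = l.count c := by
  have := pvGo_single c l.length l 0 (le_refl _)
  simpa [PySem.Chars.count] using this

lemma pvCount_pair (l : List Char) (a b : Char) (hab : a ≠ b) :
    PySem.Chars.count l [a, b] = pvPairCnt a b l := by
  have := pvGo_pair a b hab l.length l 0 (le_refl _)
  simpa [PySem.Chars.count] using this

-- characterise the loop's x-displacement by counts, with a boundary correction for `prev`
lemma pvCntE_eq : ∀ (l : List Char) (prev : Option Char),
    pvCntE prev l =
      (l.count 'e' : Int) - pvPairCnt 's' 'e' l - l.count 'w' + pvPairCnt 'n' 'w' l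
        + (if prev = some 's' ∧ l.head? = some 'e' then -1 else 0)
        + (if prev = some 'n' ∧ l.head? = some 'w' then 1 else 0) := by
  intro l
  induction l with
  | nil => intro prev; simp [pvCntE, pvPairCnt]
  | cons c t ih =>
      intro prev
      rw [pvCntE, ih (some c)]
      simp only [pvPairCnt, List.count_cons, List.head?_cons]
      push_cast
      by_cases hc1 : c = 'w' <;> by_cases hc2 : c = 'e' <;>
        by_cases hc3 : c = 'n' <;> by_cases hc4 : c = 's' <;>
        simp_all <;> split_ifs <;> simp_all <;> omega

-- the loop invariant: the fold adds the displacement counts to the running tile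
lemma pvFoldA : ∀ (l : List Char) (prev : Option Char) (x y : Int),
    (l.foldl pvStepA ((x, y), prev)).1 =
      (x + pvCntE prev l, y + ((l.count 'n' : Int) - l.count 's')) := by
  intro l
  induction l with
  | nil => intro prev x y; simp [pvCntE]
  | cons c t ih =>
      intro prev x y
      rw [List.foldl_cons,
          show pvStepA ((x, y), prev) c =
            ((if c = 'w' ∧ prev ≠ some 'n' then (x - 1, y)
              else if c = 'e' ∧ prev ≠ some 's' then (x + 1, y)
              else if c = 'n' then (x, y + 1)
              else if c = 's' then (x, y - 1) else (x, y)), some c) from rfl]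
      simp only [pvCntE, List.count_cons]
      split_ifs with h1 h2 h3 h4 <;> rw [ih] <;>
        simp_all [Prod.ext_iff] <;> ring

-- ===== VERDICT (by name: the statement is the Claim_ definition above) =====
theorem selected_tile_spec : Claim_equal_selected_tile := by
  intro path _
  unfold Spec_selected_tile selected_tile selected_tile_alt
  rw [pvFoldA path.toList none 0 0]
  simp only [PySem.Str.count,
    show ("se" : String).toList = ['s', 'e'] from rfl,
    show ("nw" : String).toList = ['n', 'w'] from rfl,
    show ("e" : String).toList = ['e'] from rfl,
    show ("w" : String).toList = ['w'] from rfl,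
    show ("n" : String).toList = ['n'] from rfl,
    show ("s" : String).toList = ['s'] from rfl]
  rw [pvCount_single, pvCount_single, pvCount_single, pvCount_single,
      pvCount_pair _ _ _ (by decide), pvCount_pair _ _ _ (by decide),
      pvCntE_eq]
  simp
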